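-- pv_equiv track=rewrite | github.com/ahadriaz99/MSci-Project | config_Testing.py | ruleAscLen
-- ===== SOURCE A (Python) =====
-- def ruleAscLen(n, l):
-- # Reproduced from [https://jeromekelleher.net/category/combinatorics.html] and
-- # Reproduced from
-- #[https://math.stackexchange.com/questions/18659/algorithm-for-generating-integer-partitions]
--     a = [0 for i in range(n + 1)]
--     k = 1
--     a[0] = 0
--     a[1] = n
--     while k != 0:
--         x = a[k - 1] + 1
--         y = a[k] - 1
--         k -= 1
--         while x <= y and k < l - 1:
--             a[k] = x
--             y -= x
--             k += 1
--         a[k] = x + y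
--         yield a[:k + 1]
-- ===== SOURCE B (Python) =====
-- def ruleAscLen(n, l):
--     # Explicit-stack recursive-descent generator of the ascending partitions
--     # of n with at most l parts, smallest-part-first, in the same order as
--     # the array successor algorithm.  A frame (s, m, c, pre) means: emit,
--     # prefixed by the chosen parts chained in pre, every partition of s into
--     # at most c parts each >= m.  While the next part m can still be split
--     # off (two slots free and 2*m <= s), push the continuation (next m) and
--     # then the descent (remainder s - m, one slot fewer, part m chained);
--     # otherwise s itself is the last part.  pre is a shared linked list
--     # (part, parent), innermost part first; each emission unrolls it.
--     stack = [(n, 1, l, None)]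
--     while stack:
--         s, m, c, pre = stack.pop()
--         if c > 1 and 2 * m <= s:
--             stack.append((s, m + 1, c, pre))
--             stack.append((s - m, m, c - 1, (m, pre)))
--         else:
--             out = [s]
--             while pre is not None:
--                 out.append(pre[0])
--                 pre = pre[1]
--             out.reverse()
--             yield out
-- ===== Notes on version B (the rewrite author's own statement) =====
-- stated objective: alternative
-- what changed: Replaced the in-place array successor machine (size-(n+1) buffer, index k, inner refill loop computing each next partition from the previous one) by an explicit-stack recursive-descent enumerator over frames (remaining sum, minimum part, remaining slots, chosen prefix) emitting the same partitions in the same order.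
import Mathlib
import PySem

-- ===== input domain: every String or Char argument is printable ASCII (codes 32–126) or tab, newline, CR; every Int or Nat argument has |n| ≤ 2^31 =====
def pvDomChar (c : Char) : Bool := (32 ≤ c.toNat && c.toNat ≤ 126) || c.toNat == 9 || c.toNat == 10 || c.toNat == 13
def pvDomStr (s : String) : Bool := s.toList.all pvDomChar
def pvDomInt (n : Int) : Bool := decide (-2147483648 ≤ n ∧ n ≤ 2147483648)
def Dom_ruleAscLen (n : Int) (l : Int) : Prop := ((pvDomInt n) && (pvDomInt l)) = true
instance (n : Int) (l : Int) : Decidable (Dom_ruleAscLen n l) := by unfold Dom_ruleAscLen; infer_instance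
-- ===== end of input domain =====

-- B replaces A's in-place array successor machine by an explicit-stack recursive-
-- descent enumerator over (remaining sum, minimum part, remaining slots, prefix)
-- frames; objective: alternative.
-- A is a generator; equivalence is about the list of yielded values.

-- ===== PORT A =====
-- inner while loop: `while x <= y and k < l - 1: a[k] = x; y -= x; k += 1`
-- (k stays ≥ 0 in A, so it is carried as a Nat; a[k] = x is List.set — under
-- Pre_ every written index is proved in range, matching Python exactly)
def pvInnerA (l : Int) (a : List Int) (k : Nat) (x y : Int) : List Int × Nat × Int :=
  if h : x ≤ y ∧ (k : Int) < l - 1 then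
    pvInnerA l (a.set k x) (k + 1) x (y - x)
  else (a, k, y)
termination_by (l - 1 - (k : Int)).toNat
decreasing_by
  have := h.2; omega

-- outer while loop: `while k != 0: …; yield a[:k+1]`; each iteration yields once,
-- so the fuel only needs to cover the number of emitted partitions (≤ 2^(n-1))
def pvOuterA (l : Int) (fuel : Nat) (a : List Int) (k : Nat) : List (List Int) :=
  match fuel with
  | 0 => []
  | fuel + 1 =>
    if k = 0 then []
    else
      let x := a.getD (k - 1) 0 + 1
      let y := a.getD k 0 - 1
      let r := pvInnerA l a (k - 1) x y
      let a' := r.1.set r.2.1 (x + r.2.2)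
      (a'.take (r.2.1 + 1)) :: pvOuterA l fuel a' r.2.1

def ruleAscLen (n : Int) (l : Int) : List (List Int) :=
  -- a = [0 for i in range(n+1)]; k = 1; a[0] = 0; a[1] = n
  -- (for n ≤ 0 Python raises IndexError here; such n are outside Pre_)
  let a := ((List.replicate (n + 1).toNat 0).set 0 0).set 1 n
  pvOuterA l (2 ^ (n - 1).toNat) a 1

-- ===== PORT B =====
-- `stack = [(n, 1, l, None)]; while stack: ...` — explicit-stack descent; a frame
-- (s, m, c, pre) emits, prefixed by the parts chained in pre (innermost first),
-- every partition of s into at most c parts ≥ m.  The fuel bounds the number of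
-- loop iterations (enough under Pre_, proved below); the linked prefix is a List.
def pvStackB : Nat → List (Int × Int × Int × List Int) → List (List Int)
  | 0, _ => []
  | _ + 1, [] => []
  | f + 1, (s, m, c, pre) :: fs =>
    if 1 < c ∧ 2 * m ≤ s then
      pvStackB f ((s - m, m, c - 1, m :: pre) :: (s, m + 1, c, pre) :: fs)
    else ((s :: pre).reverse) :: pvStackB f fs

def ruleAscLen_alt (n : Int) (l : Int) : List (List Int) :=
  pvStackB (2 ^ ((n - 1).toNat + 1)) [(n, 1, l, [])]

-- ===== PRECONDITION & SPEC =====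
-- Pre_ excludes exactly the inputs where A raises: for n ≤ 0 the buffer
-- [0]*(n+1) has no index 1 and `a[1] = n` raises IndexError.
def Pre_ruleAscLen (n : Int) (l : Int) : Prop := 1 ≤ n
instance (n : Int) (l : Int) : Decidable (Pre_ruleAscLen n l) := by unfold Pre_ruleAscLen; infer_instance
def pvWitness_ruleAscLen : Int × Int := (5, 2)

def Spec_ruleAscLen (n : Int) (l : Int) (out : List (List Int)) : Prop := out = ruleAscLen_alt n l
instance (n : Int) (l : Int) (out : List (List Int)) : Decidable (Spec_ruleAscLen n l out) := by unfold Spec_ruleAscLen; infer_instance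

-- ===== CLAIM (what is proved, stated in full; the proofs are below) =====
def Claim_equal_ruleAscLen : Prop := ∀ (n : Int) (l : Int), Dom_ruleAscLen n l → Pre_ruleAscLen n l → Spec_ruleAscLen n l (ruleAscLen n l)

-- ===== LEMMAS AND PROOFS =====

-- recursive presentation of the descent: genFrom s m c is everything a frame
-- (s, m, c, _) of B's stack eventually emits (without its prefix)
def genFrom (s : Int) (m : Int) (c : Int) : List (List Int) :=
  if h : 1 < c ∧ 2 * m ≤ s then
    ((genFrom (s - m) m (c - 1)).map (fun t => m :: t)) ++ genFrom s (m + 1) c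
  else [[s]]
termination_by (c.toNat, (s - 2 * m + 1).toNat)
decreasing_by
  · exact Prod.Lex.left _ _ (by have := h.1; omega)
  · exact Prod.Lex.right _ (by have := h.2; omega)

theorem genFrom_ne_nil (s m c : Int) : genFrom s m c ≠ [] := by
  induction s, m, c using genFrom.induct with
  | case1 s m c h ih1 ih2 =>
    rw [genFrom, dif_pos h]
    simp only [ne_eq, List.append_eq_nil_iff, not_and]
    intro _ hc; exact ih2 hc
  | case2 s m c h => rw [genFrom, dif_neg h]; simp

-- the first partition genFrom s m c emits (= the partition A's inner loop builds)
def pvHd (s : Int) (m : Int) (c : Int) : List Int :=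
  if h : 1 < c ∧ 2 * m ≤ s then m :: pvHd (s - m) m (c - 1) else [s]
termination_by c.toNat
decreasing_by
  have := h.1; omega

theorem pvHd_sum (s m c : Int) : (pvHd s m c).sum = s := by
  induction s, c using pvHd.induct (m := m) with
  | case1 s c h ih => rw [pvHd, dif_pos h]; simp [ih]
  | case2 s c h => rw [pvHd, dif_neg h]; simp

theorem pvHd_pos (s m c : Int) (hm : 1 ≤ m) : m ≤ s → ∀ x ∈ pvHd s m c, 1 ≤ x := by
  induction s, c using pvHd.induct (m := m) with
  | case1 s c h ih =>
    intro hs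
    rw [pvHd, dif_pos h]
    intro x hx
    rcases List.mem_cons.1 hx with rfl | hx
    · exact hm
    · exact ih (by omega) x hx
  | case2 s c h =>
    intro hs
    rw [pvHd, dif_neg h]
    intro x hx; simp at hx; omega

theorem pvHd_length (s m c : Int) (hm : 1 ≤ m) : m ≤ s → (pvHd s m c).length ≤ s.toNat := by
  induction s, c using pvHd.induct (m := m) with
  | case1 s c h ih =>
    intro hs
    rw [pvHd, dif_pos h]
    have := ih (by omega)
    simp only [List.length_cons]
    omega
  | case2 s c h =>
    intro hs
    rw [pvHd, dif_neg h]; simp; omega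

theorem pvHd_ne_nil (s m c : Int) : pvHd s m c ≠ [] := by
  rw [pvHd]; split <;> simp

theorem genFrom_length (s m c : Int) (hm : 1 ≤ m) :
    (genFrom s m c).length ≤ 2 ^ ((s - m).toNat) := by
  induction s, m, c using genFrom.induct with
  | case1 s m c h ih1 ih2 =>
    rw [genFrom, dif_pos h]
    have h1 := ih1 hm
    have h2 := ih2 (by omega)
    simp only [List.length_append, List.length_map]
    have e1 : (s - m - m).toNat ≤ (s - m - 1).toNat := by omega
    have e2 : (s - m - 1).toNat + 1 = (s - m).toNat := by omega
    calc (genFrom (s - m) m (c - 1)).length + (genFrom s (m + 1) c).length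
        ≤ 2 ^ ((s - m - m).toNat) + 2 ^ ((s - (m + 1)).toNat) := by omega
      _ ≤ 2 ^ ((s - m - 1).toNat) + 2 ^ ((s - m - 1).toNat) := by
          have := Nat.pow_le_pow_right (by norm_num : 1 ≤ 2) e1
          have e3 : s - (m + 1) = s - m - 1 := by ring
          rw [e3]; omega
      _ = 2 ^ ((s - m - 1).toNat + 1) := by ring
      _ ≤ 2 ^ ((s - m).toNat) := by rw [e2]
  | case2 s m c h =>
    rw [genFrom, dif_neg h]; simp [Nat.one_le_two_pow]

-- cost (number of loop iterations of B's stack machine) to process one frame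
def pvSteps (s : Int) (m : Int) (c : Int) : Nat :=
  if h : 1 < c ∧ 2 * m ≤ s then 1 + pvSteps (s - m) m (c - 1) + pvSteps s (m + 1) c
  else 1
termination_by (c.toNat, (s - 2 * m + 1).toNat)
decreasing_by
  · exact Prod.Lex.left _ _ (by have := h.1; omega)
  · exact Prod.Lex.right _ (by have := h.2; omega)

theorem pvSteps_pos (s m c : Int) : 1 ≤ pvSteps s m c := by
  rw [pvSteps]; split <;> omega

theorem pvSteps_eq (s m c : Int) : pvSteps s m c + 1 = 2 * (genFrom s m c).length := by
  induction s, m, c using genFrom.induct with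
  | case1 s m c h ih1 ih2 =>
    rw [pvSteps, dif_pos h, genFrom, dif_pos h]
    simp only [List.length_append, List.length_map]
    omega
  | case2 s m c h =>
    rw [pvSteps, dif_neg h, genFrom, dif_neg h]
    simp

-- B's stack machine processes its frames left to right, frame f emitting
-- genFrom f with f's prefix in front
theorem pvStackB_eq :
    ∀ (fuel : Nat) (fs : List (Int × Int × Int × List Int)),
      (fs.map (fun f => pvSteps f.1 f.2.1 f.2.2.1)).sum ≤ fuel →
      pvStackB fuel fs =
        fs.flatMap (fun f => (genFrom f.1 f.2.1 f.2.2.1).map (fun t => f.2.2.2.reverse ++ t)) := by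
  intro fuel
  induction fuel with
  | zero =>
    intro fs hf
    match fs with
    | [] => rfl
    | f :: fs =>
      exfalso
      simp only [List.map_cons, List.sum_cons] at hf
      have := pvSteps_pos f.1 f.2.1 f.2.2.1
      omega
  | succ N ih =>
    intro fs hf
    match fs with
    | [] => rfl
    | (s, m, c, pre) :: fs =>
      simp only [List.map_cons, List.sum_cons] at hf
      by_cases h : 1 < c ∧ 2 * m ≤ s
      · rw [pvStackB, if_pos h]
        rw [pvSteps, dif_pos h] at hf
        rw [ih _ (by simp only [List.map_cons, List.sum_cons]; omega)]
        simp only [List.flatMap_cons]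
        conv_rhs => rw [genFrom, dif_pos h]
        simp only [List.map_append, List.map_map, List.append_assoc]
        congr 1
        apply List.map_congr_left
        intro t _
        simp
      · rw [pvStackB, if_neg h]
        rw [pvSteps, dif_neg h] at hf
        rw [ih _ (by omega)]
        simp only [List.flatMap_cons]
        conv_rhs => rw [genFrom, dif_neg h]
        simp

theorem ruleAscLen_alt_eq (n l : Int) : ruleAscLen_alt n l = genFrom n 1 l := by
  show pvStackB (2 ^ ((n - 1).toNat + 1)) [(n, 1, l, [])] = _
  rw [pvStackB_eq]
  · simp
  · simp only [List.map_cons, List.map_nil, List.sum_cons, List.sum_nil]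
    have h1 := pvSteps_eq n 1 l
    have h2 := genFrom_length n 1 l (le_refl 1)
    rw [pow_succ]
    omega

-- the sequence of partitions A still has to emit from stack rt.reverse ++ [u, v]
mutual
def pvPred (l : Int) (rt : List Int) (u v : Int) : List (List Int) :=
  ((genFrom (u + v) (u + 1) (l - rt.length)).map (fun p => rt.reverse ++ p)) ++
    pvAfter l rt (u + v)
def pvAfter (l : Int) : List Int → Int → List (List Int)
  | [], _ => []
  | u' :: rt', w => pvPred l rt' u' w
end

def pvPredStack (l : Int) : List Int → List (List Int)
  | v :: u :: rt => pvPred l rt u v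
  | _ => []

theorem pvPred_ne_nil (l : Int) (rt : List Int) (u v : Int) : pvPred l rt u v ≠ [] := by
  rw [pvPred]
  simp only [ne_eq, List.append_eq_nil_iff, List.map_eq_nil_iff, not_and]
  intro h; exact absurd h (genFrom_ne_nil _ _ _)

-- one successor-shift: first branch of genFrom pushed onto the stack
theorem pvPred_shift (l : Int) (rt : List Int) (u v : Int)
    (hc : 1 < l - rt.length) (hs : 2 * (u + 1) ≤ u + v) :
    pvPred l rt u v = pvPred l ((u + 1) :: rt) u (v - u - 1) := by
  have hg : genFrom (u + v) (u + 1) (l - (rt.length : Int)) =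
      ((genFrom (u + v - (u + 1)) (u + 1) (l - (rt.length : Int) - 1)).map
          (fun t => (u + 1) :: t)) ++
        genFrom (u + v) (u + 1 + 1) (l - (rt.length : Int)) := by
    rw [genFrom, dif_pos ⟨hc, hs⟩]
  have e1 : u + (v - u - 1) = v - 1 := by ring
  have e2 : u + v - (u + 1) = v - 1 := by ring
  have e3 : u + 1 + (v - 1) = u + v := by ring
  rw [pvPred.eq_def (l := l) (rt := (u + 1) :: rt), pvAfter, e1,
      pvPred.eq_def (l := l) (rt := rt) (u := u + 1) (v := v - 1),
      pvPred.eq_def (l := l) (rt := rt) (u := u) (v := v), hg, e3]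
  have e4 : l - ((rt.length : Int) + 1) = l - (rt.length : Int) - 1 := by ring
  simp only [List.map_append, List.map_map, List.length_cons, Nat.cast_add, Nat.cast_one,
    List.reverse_cons, List.append_assoc, e2, e4]
  congr 1

-- the heart: pvPred l rt u v = (next yield) :: (pvPred of the yielded stack)
theorem pvPred_cons_base (l : Int) (rt : List Int) (u v : Int)
    (h : ¬(1 < l - (rt.length : Int) ∧ 2 * (u + 1) ≤ u + v)) :
    pvPred l rt u v =
      (rt.reverse ++ pvHd (u + v) (u + 1) (l - rt.length)) ::
        pvPredStack l ((pvHd (u + v) (u + 1) (l - rt.length)).reverse ++ rt) := by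
  have hhd : pvHd (u + v) (u + 1) (l - (rt.length : Int)) = [u + v] := by
    rw [pvHd, dif_neg h]
  have hg : genFrom (u + v) (u + 1) (l - (rt.length : Int)) = [[u + v]] := by
    rw [genFrom, dif_neg h]
  rw [pvPred.eq_def, hg, hhd]
  cases rt with
  | nil => simp [pvAfter, pvPredStack]
  | cons u' rt' => simp [pvAfter, pvPredStack]

theorem pvPred_cons_aux (l : Int) :
    ∀ (N : Nat) (rt : List Int) (u v : Int), (l - rt.length).toNat ≤ N →
      pvPred l rt u v =
        (rt.reverse ++ pvHd (u + v) (u + 1) (l - rt.length)) ::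
          pvPredStack l ((pvHd (u + v) (u + 1) (l - rt.length)).reverse ++ rt) := by
  intro N
  induction N with
  | zero =>
    intro rt u v hN
    refine pvPred_cons_base l rt u v ?_
    intro hcon
    omega
  | succ N ih =>
    intro rt u v hN
    by_cases h : 1 < l - (rt.length : Int) ∧ 2 * (u + 1) ≤ u + v
    · rw [pvPred_shift l rt u v h.1 h.2]
      rw [ih ((u + 1) :: rt) u (v - u - 1) (by simp only [List.length_cons]; omega)]
      have e1 : u + (v - u - 1) = u + v - (u + 1) := by ring
      have e2 : l - ((((u + 1) :: rt).length : Nat) : Int) = l - (rt.length : Int) - 1 := by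
        simp only [List.length_cons]; push_cast; ring
      have hhd : pvHd (u + v) (u + 1) (l - (rt.length : Int)) =
          (u + 1) :: pvHd (u + v - (u + 1)) (u + 1) (l - (rt.length : Int) - 1) := by
        rw [pvHd, dif_pos h]
      rw [hhd]
      simp only [e1, e2, List.reverse_cons, List.append_assoc, List.cons_append,
        List.nil_append]
    · exact pvPred_cons_base l rt u v h

theorem pvPred_cons (l : Int) (rt : List Int) (u v : Int) :
    pvPred l rt u v =
      (rt.reverse ++ pvHd (u + v) (u + 1) (l - rt.length)) ::
        pvPredStack l ((pvHd (u + v) (u + 1) (l - rt.length)).reverse ++ rt) :=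
  pvPred_cons_aux l (l - rt.length).toNat rt u v le_rfl

-- A's inner loop followed by the final write a[k] = x + y builds exactly pvHd
theorem pvTakeSetSucc (a : List Int) (k : Nat) (z : Int) (h : k < a.length) :
    (a.set k z).take (k + 1) = a.take k ++ [z] := by
  rw [List.take_set, List.take_add_one]
  have h1 : a[k]? = some a[k] := List.getElem?_eq_getElem h
  rw [h1]
  have h2 : (a.take k).length = k := by simp; omega
  rw [List.set_append]
  simp [h2]

theorem pvInnerA_spec (l x : Int) :
    ∀ (a : List Int) (k : Nat) (y : Int),
      k + (pvHd (x + y) x (l - (k : Int))).length ≤ a.length →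
      (pvInnerA l a k x y).1.length = a.length ∧
      (pvInnerA l a k x y).2.1 + 1 = k + (pvHd (x + y) x (l - (k : Int))).length ∧
      ((pvInnerA l a k x y).1.set (pvInnerA l a k x y).2.1
          (x + (pvInnerA l a k x y).2.2)).take ((pvInnerA l a k x y).2.1 + 1) =
        a.take k ++ pvHd (x + y) x (l - (k : Int)) := by
  intro a k y
  induction a, k, y using pvInnerA.induct (l := l) (x := x) with
  | case1 a k y h ih =>
    intro hlen
    have hcond : 1 < l - (k : Int) ∧ 2 * x ≤ x + y := by
      obtain ⟨h1, h2⟩ := h; constructor <;> omega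
    have hhd : pvHd (x + y) x (l - (k : Int)) =
        x :: pvHd (x + y - x) x (l - (k : Int) - 1) := by
      rw [pvHd, dif_pos hcond]
    have e0 : x + (y - x) = x + y - x := by ring
    have e1 : l - ((k : Int) + 1) = l - (k : Int) - 1 := by ring
    have hlen' : (k + 1) + (pvHd (x + (y - x)) x (l - ((k + 1 : Nat) : Int))).length ≤
        (a.set k x).length := by
      rw [List.length_set]
      push_cast
      rw [e0, e1]
      rw [hhd] at hlen
      simp only [List.length_cons] at hlen
      omega
    have ih' := ih hlen'
    rw [pvInnerA, dif_pos h]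
    refine ⟨by rw [ih'.1]; simp, ?_, ?_⟩
    · rw [ih'.2.1, hhd]
      simp only [List.length_cons]
      push_cast
      rw [e0, e1]
      omega
    · rw [ih'.2.2]
      have hk : k < a.length := by
        rw [hhd] at hlen
        simp only [List.length_cons] at hlen
        have : 1 ≤ (pvHd (x + y - x) x (l - (k : Int) - 1)).length :=
          List.length_pos_iff.2 (pvHd_ne_nil _ _ _)
        omega
      rw [pvTakeSetSucc a k x hk, hhd]
      push_cast
      rw [e0, e1]
      simp [List.append_assoc]
  | case2 a k y h =>
    intro hlen
    have hcond : ¬(1 < l - (k : Int) ∧ 2 * x ≤ x + y) := by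
      intro hc
      exact h ⟨by omega, by omega⟩
    have hhd : pvHd (x + y) x (l - (k : Int)) = [x + y] := by
      rw [pvHd, dif_neg hcond]
    rw [pvInnerA, dif_neg h, hhd]
    have hk : k < a.length := by rw [hhd] at hlen; simp at hlen; omega
    exact ⟨rfl, by simp, pvTakeSetSucc a k (x + y) hk⟩

theorem pvSumGeLen (ys : List Int) (h : ∀ x ∈ ys, 1 ≤ x) : (ys.length : Int) ≤ ys.sum := by
  induction ys with
  | nil => simp
  | cons b t ih =>
    simp only [List.sum_cons, List.length_cons]
    have hb := h b (by simp)
    have := ih (fun x hx => h x (by simp [hx]))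
    push_cast
    omega

theorem pvOuterA_zero_k (l : Int) (fuel : Nat) (a : List Int) :
    pvOuterA l fuel a 0 = [] := by
  cases fuel <;> simp [pvOuterA]

theorem pvOuterA_eq (l : Int) (fuel : Nat) (a : List Int) (k : Nat)
    (rt : List Int) (u v : Int)
    (h1 : a.take (k + 1) = rt.reverse ++ [u, v])
    (h2 : k = rt.length + 1)
    (h4 : ∀ x ∈ (rt.reverse ++ [u, v]).tail, 1 ≤ x)
    (h5 : ∀ x ∈ rt.reverse ++ [u, v], 0 ≤ x)
    (h6 : (rt.reverse ++ [u, v]).sum + 1 ≤ (a.length : Int))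
    (h7 : (pvPred l rt u v).length ≤ fuel) :
    pvOuterA l fuel a k = pvPred l rt u v := by
  induction fuel generalizing a k rt u v with
  | zero =>
    exfalso
    have := List.length_pos_iff.2 (pvPred_ne_nil l rt u v)
    omega
  | succ N ih =>
    -- facts about the current stack
    have hkpos : k ≠ 0 := by omega
    have hu0 : 0 ≤ u := h5 u (by simp)
    have hv1 : 1 ≤ v := by
      refine h4 v ?_
      cases hrev : rt.reverse with
      | nil => simp
      | cons b t => simp
    have hsum : (rt.reverse ++ [u, v]).sum = rt.reverse.sum + (u + v) := by
      simp [List.sum_append]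
    have hrsum : (rt.length : Int) - 1 ≤ rt.reverse.sum := by
      cases hrev : rt.reverse with
      | nil =>
        have : rt = [] := List.reverse_eq_nil_iff.mp hrev
        simp [this]
      | cons b t =>
        have hb : 0 ≤ b := h5 b (by simp [hrev])
        have ht : (t.length : Int) ≤ t.sum := by
          apply pvSumGeLen
          intro x hx
          apply h4 x
          simp [hrev, hx]
        have hlen : rt.length = t.length + 1 := by
          have : rt.reverse.length = rt.length := by simp
          rw [hrev] at this
          simp at this
          omega
        simp only [List.sum_cons, hlen]
        push_cast
        omega
    -- the partition built by the inner loop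
    set hd := pvHd (u + v) (u + 1) (l - (rt.length : Int)) with hhd
    have hdpos : ∀ z ∈ hd, 1 ≤ z := pvHd_pos _ _ _ (by omega) (by omega)
    have hdsum : hd.sum = u + v := pvHd_sum _ _ _
    have hdlen : hd.length ≤ (u + v).toNat := pvHd_length _ _ _ (by omega) (by omega)
    have hdne : hd ≠ [] := pvHd_ne_nil _ _ _
    have hdlen1 : 1 ≤ hd.length := List.length_pos_iff.2 hdne
    have hkey : rt.length + hd.length ≤ a.length := by
      rw [hsum] at h6
      omega
    -- reading a[k-1] and a[k]
    have hrevlen : rt.reverse.length = rt.length := by simp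
    have hgu : a.getD (k - 1) 0 = u := by
      have e : a[k-1]? = (a.take (k+1))[k-1]? := by
        rw [List.getElem?_take]; simp only [if_pos (by omega : k - 1 < k + 1)]
      rw [List.getD_eq_getElem?_getD, e, h1,
          List.getElem?_append_right (by omega : rt.reverse.length ≤ k - 1)]
      simp [hrevlen, h2]
    have hgv : a.getD k 0 = v := by
      have e : a[k]? = (a.take (k+1))[k]? := by
        rw [List.getElem?_take]; simp only [if_pos (by omega : k < k + 1)]
      rw [List.getD_eq_getElem?_getD, e, h1,
          List.getElem?_append_right (by omega : rt.reverse.length ≤ k)]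
      have : k - rt.reverse.length = 1 := by omega
      rw [this]
      simp
    -- the inner loop
    have ecast : ((k - 1 : Nat) : Int) = (rt.length : Int) := by omega
    have espec : (u + 1) + (v - 1) = u + v := by ring
    have hlen' : (k - 1) + (pvHd ((u + 1) + (v - 1)) (u + 1) (l - ((k - 1 : Nat) : Int))).length
        ≤ a.length := by
      rw [espec, ecast, ← hhd]
      omega
    obtain ⟨slen, skk, stake⟩ := pvInnerA_spec l (u + 1) a (k - 1) (v - 1) hlen'
    rw [espec, ecast, ← hhd] at skk stake
    -- a.take (k-1) = rt.reverse
    have htk : a.take (k - 1) = rt.reverse := by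
      have : a.take (k - 1) = (a.take (k + 1)).take (k - 1) := by
        rw [List.take_take]; congr 1; omega
      rw [this, h1, List.take_append_of_le_length (by omega), List.take_of_length_le (by omega)]
    rw [htk] at stake
    -- one unfolding of the outer loop
    rw [pvOuterA, if_neg hkpos, hgu, hgv]
    rw [pvPred_cons l rt u v]
    rw [← hhd]
    set R := pvInnerA l a (k - 1) (u + 1) (v - 1) with hR
    refine congrArg₂ _ stake ?_
    -- the remaining iterations
    have hstk2 : rt.reverse ++ hd = (hd.reverse ++ rt).reverse := by
      simp
    have hlen2 : (hd.reverse ++ rt).length = R.2.1 + 1 := by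
      simp only [List.length_append, List.length_reverse]
      omega
    match e : hd.reverse ++ rt with
    | [] => exact absurd (congrArg List.length e) (by simp [hlen2])
    | [w] =>
      have hk0 : R.2.1 = 0 := by rw [e] at hlen2; simp at hlen2; omega
      rw [hk0, pvOuterA_zero_k]
      simp [pvPredStack]
    | w :: u2 :: rt2 =>
      show pvOuterA l N (R.1.set R.2.1 (u + 1 + R.2.2)) R.2.1 = pvPred l rt2 u2 w
      have hS : rt2.reverse ++ [u2, w] = rt.reverse ++ hd := by
        rw [hstk2, e]
        simp
      have hk2 : R.2.1 = rt2.length + 1 := by rw [e] at hlen2; simp at hlen2; omega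
      -- invariants for the new stack
      have hmem : ∀ z ∈ rt.reverse ++ hd, z ∈ rt.reverse ∨ z ∈ hd := by
        intro z hz; exact List.mem_append.1 hz
      have h5' : ∀ z ∈ rt2.reverse ++ [u2, w], 0 ≤ z := by
        rw [hS]
        intro z hz
        rcases hmem z hz with hz | hz
        · exact h5 z (by simp [hz])
        · have := hdpos z hz; omega
      have h4' : ∀ z ∈ (rt2.reverse ++ [u2, w]).tail, 1 ≤ z := by
        rw [hS]
        cases hrev : rt.reverse with
        | nil =>
          simp only [List.nil_append]
          intro z hz
          exact hdpos z (List.mem_of_mem_tail hz)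
        | cons b t =>
          simp only [List.cons_append, List.tail_cons]
          intro z hz
          rcases List.mem_append.1 hz with hz | hz
          · exact h4 z (by simp [hrev, hz])
          · exact hdpos z hz
      have h6' : (rt2.reverse ++ [u2, w]).sum + 1 ≤ ((R.1.set R.2.1 (u + 1 + R.2.2)).length : Int) := by
        have hlenset : (R.1.set R.2.1 (u + 1 + R.2.2)).length = a.length := by
          rw [List.length_set, slen]
        rw [hlenset, hS, List.sum_append, hdsum]
        omega
      have h1' : (R.1.set R.2.1 (u + 1 + R.2.2)).take (R.2.1 + 1) = rt2.reverse ++ [u2, w] := by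
        rw [hS, stake]
      have h7' : (pvPred l rt2 u2 w).length ≤ N := by
        have := pvPred_cons l rt u v
        rw [← hhd] at this
        have hlen3 : (pvPred l rt u v).length = (pvPredStack l (hd.reverse ++ rt)).length + 1 := by
          rw [this]; simp
        rw [e] at hlen3
        simp only [pvPredStack] at hlen3
        omega
      exact ih (R.1.set R.2.1 (u + 1 + R.2.2)) R.2.1 rt2 u2 w h1' hk2 h4' h5' h6' h7'

-- ===== VERDICT (by name: the statement is the Claim_ definition above) =====
theorem pvPred_nil (l u v : Int) : pvPred l [] u v = genFrom (u + v) (u + 1) l := by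
  rw [pvPred.eq_def, pvAfter]
  simp

theorem ruleAscLen_spec : Claim_equal_ruleAscLen := by
  intro n l _ hpre
  have hn : 1 ≤ n := hpre
  show ruleAscLen n l = ruleAscLen_alt n l
  rw [ruleAscLen_alt_eq n l]
  obtain ⟨m, hm⟩ : ∃ m : Nat, (n + 1).toNat = m + 2 := ⟨(n + 1).toNat - 2, by omega⟩
  have ha : ((List.replicate (n + 1).toNat (0 : Int)).set 0 0).set 1 n
      = 0 :: n :: List.replicate m 0 := by
    rw [hm, List.replicate_succ, List.replicate_succ]
    rfl
  show pvOuterA l (2 ^ (n - 1).toNat)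
      (((List.replicate (n + 1).toNat 0).set 0 0).set 1 n) 1 = genFrom n 1 l
  rw [ha]
  have h := pvOuterA_eq l (2 ^ (n - 1).toNat) (0 :: n :: List.replicate m 0) 1 [] 0 n
    (by simp)
    (by simp)
    (by intro x hx; simp at hx; omega)
    (by intro x hx; simp at hx; rcases hx with rfl | rfl <;> omega)
    (by simp; omega)
    (by
      rw [pvPred_nil]
      have := genFrom_length (0 + n) (0 + 1) l (by omega)
      have e : (0 + n) - (0 + 1) = n - 1 := by ring
      rw [e] at this
      exact this)
  rw [h, pvPred_nil]
  norm_num
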